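-- pv_equiv track=rewrite | github.com/hqyone/eccDNA_Workflow | modules/search_circle.py | removeSelfConnect
-- ===== SOURCE A (Python) =====
-- def removeSelfConnect(data):
--     result_data=[]
--     selfConnect_ls=[]
--     for d in data:
--         if len(result_data)==0:
--             result_data.append(d)
--         else:
--             matched=-1
--             for i, r in enumerate(result_data):
--                 if (d[0] == r[1] and d[1]==r[0]):
--                     matched=i
--                     break
--             if matched!=-1:
--                 selfConnect_ls.append(d)
--                 del result_data[i]
--             else:
--                 result_data.append(d)
--     return (result_data, selfConnect_ls)
-- ===== SOURCE B (Python) =====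
-- def removeSelfConnect(data):
--     # Three stages: bucket entries by their unordered pair, match opposite
--     # orientations FIFO inside each bucket with one head-pointer queue, then
--     # rebuild both outputs in one scan by index status.
--     groups = {}
--     for n, d in enumerate(data):
--         k = d if d[0] <= d[1] else (d[1], d[0])
--         groups.setdefault(k, []).append((n, d))
--     removed = set()
--     selfed = set()
--     for entries in groups.values():
--         q, h, orient = [], 0, None  # live queue is q[h:], all of value orient
--         for n, d in entries:
--             if h < len(q) and orient == (d[1], d[0]):
--                 removed.add(q[h])
--                 h += 1
--                 selfed.add(n)
--             else:
--                 if h == len(q):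
--                     orient = d
--                 q.append(n)
--     result_data = []
--     selfConnect_ls = []
--     for n, d in enumerate(data):
--         if n in selfed:
--             selfConnect_ls.append(d)
--         elif n not in removed:
--             result_data.append(d)
--     return (result_data, selfConnect_ls)
-- ===== Notes on version B (the rewrite author's own statement) =====
-- stated objective: faster
-- what changed: Replaces A's single pass with an inner linear scan of the kept list by three stages: bucket entries by their unordered pair, FIFO-match opposite orientations inside each bucket with a single head-pointer queue, then rebuild both outputs in one scan by index status.
import Mathlib
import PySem

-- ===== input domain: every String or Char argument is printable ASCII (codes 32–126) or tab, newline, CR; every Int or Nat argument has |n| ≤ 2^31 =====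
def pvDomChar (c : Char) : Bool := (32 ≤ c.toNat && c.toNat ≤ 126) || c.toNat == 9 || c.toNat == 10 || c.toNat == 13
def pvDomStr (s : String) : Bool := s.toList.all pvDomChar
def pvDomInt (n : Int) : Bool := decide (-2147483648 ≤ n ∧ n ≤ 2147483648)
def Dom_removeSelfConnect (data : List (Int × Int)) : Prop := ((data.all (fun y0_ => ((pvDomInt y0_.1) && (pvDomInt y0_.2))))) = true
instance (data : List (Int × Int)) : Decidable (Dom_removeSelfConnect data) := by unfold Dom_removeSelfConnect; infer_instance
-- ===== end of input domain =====

-- B replaces A's one-pass-with-inner-scan by three stages — bucket entries by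
-- unordered pair, FIFO-match opposite orientations inside each bucket with a
-- head-pointer queue, rebuild both outputs by index status (objective: faster).

-- ===== PORT A =====
-- loop body of A: scan result_data for the first reversed match (enumerate +
-- break gives the first index), delete that index, else append
def pvStepA (st : (List (Int × Int)) × (List (Int × Int))) (d : Int × Int) :
    (List (Int × Int)) × (List (Int × Int)) :=
  if st.1.length == 0 then (st.1 ++ [d], st.2)
  else
    match List.findIdx? (fun r => d.1 == r.2 && d.2 == r.1) st.1 with
    | some i => (st.1.eraseIdx i, st.2 ++ [d])
    | none => (st.1 ++ [d], st.2)

def removeSelfConnect (data : List (Int × Int)) : (List (Int × Int)) × (List (Int × Int)) :=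
  data.foldl pvStepA ([], [])

-- ===== PORT B =====
-- k = d if d[0] <= d[1] else (d[1], d[0])
def pvCanon (d : Int × Int) : Int × Int := if d.1 ≤ d.2 then d else (d.2, d.1)

-- stage 1: groups.setdefault(k, []).append((n, d))  is  modify k [] (· ++ [(n, d)])
def pvGroups (data : List (Int × Int)) :
    PySem.Dict (Int × Int) (List (Int × (Int × Int))) :=
  (PySem.List.enumerate data 0).foldl
    (fun g nd => g.modify (pvCanon nd.2) [] (· ++ [nd])) PySem.Dict.empty

-- stage 2 loop body; state (q, h, orient, removed, selfed); q[h] is guarded by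
-- h < len(q), so pyGet? is some there and the .getD 0 default is unreachable
def pvMatchStep
    (st : List Int × Int × Option (Int × Int) × PySem.Set Int × PySem.Set Int)
    (nd : Int × (Int × Int)) :
    List Int × Int × Option (Int × Int) × PySem.Set Int × PySem.Set Int :=
  if st.2.1 < (st.1.length : Int) ∧ st.2.2.1 == some (nd.2.2, nd.2.1) then
    (st.1, st.2.1 + 1, st.2.2.1,
      PySem.Set.add st.2.2.2.1 ((PySem.List.pyGet? st.1 st.2.1).getD 0),
      PySem.Set.add st.2.2.2.2 nd.1)
  else
    (st.1 ++ [nd.1], st.2.1,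
      (if st.2.1 == (st.1.length : Int) then some nd.2 else st.2.2.1),
      st.2.2.2.1, st.2.2.2.2)

def pvStatus (data : List (Int × Int)) : PySem.Set Int × PySem.Set Int :=
  (pvGroups data).values.foldl
    (fun acc entries =>
      let r := entries.foldl pvMatchStep ([], 0, none, acc.1, acc.2)
      (r.2.2.2.1, r.2.2.2.2))
    (PySem.Set.empty, PySem.Set.empty)

-- stage 3: one scan, dispatch each entry on its index status
def removeSelfConnect_alt (data : List (Int × Int)) :
    (List (Int × Int)) × (List (Int × Int)) :=
  let st := pvStatus data
  (PySem.List.enumerate data 0).foldl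
    (fun out nd =>
      if PySem.Set.contains st.2 nd.1 then (out.1, out.2 ++ [nd.2])
      else if PySem.Set.contains st.1 nd.1 then out
      else (out.1 ++ [nd.2], out.2))
    ([], [])

-- ===== PRECONDITION & SPEC =====
def Spec_removeSelfConnect (data : List (Int × Int)) (out : (List (Int × Int)) × (List (Int × Int))) : Prop := out = removeSelfConnect_alt data
instance (data : List (Int × Int)) (out : (List (Int × Int)) × (List (Int × Int))) : Decidable (Spec_removeSelfConnect data out) := by unfold Spec_removeSelfConnect; infer_instance

-- ===== CLAIM (what is proved, stated in full; the proofs are below) =====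
def Claim_equal_removeSelfConnect : Prop := ∀ (data : List (Int × Int)), Dom_removeSelfConnect data → Spec_removeSelfConnect data (removeSelfConnect data)

-- ===== LEMMAS AND PROOFS =====

-- proof-layer midpoint: ONE chronological pass, state = per-orientation queues,
-- outputs the removed entries (index, value) and the self-connect entries
def pvGrun : List (Int × (Int × Int)) → PySem.Dict (Int × Int) (List Int) →
    PySem.Dict (Int × Int) (List Int) × List (Int × (Int × Int)) × List (Int × (Int × Int))
  | [], σ => (σ, [], [])
  | nd :: L, σ =>
    match σ.getD (nd.2.2, nd.2.1) [] with
    | j :: rest =>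
      let r := pvGrun L (σ.insert (nd.2.2, nd.2.1) rest)
      (r.1, (j, (nd.2.2, nd.2.1)) :: r.2.1, nd :: r.2.2)
    | [] => pvGrun L (σ.insert nd.2 (σ.getD nd.2 [] ++ [nd.1]))

-- A's inner-loop predicate is equality with the reversed pair
lemma pv_pred_eq (d : Int × Int) :
    (fun r : Int × Int => d.1 == r.2 && d.2 == r.1) = (fun r => r == (d.2, d.1)) := by
  funext r
  rcases r with ⟨a, b⟩
  show (d.1 == b && d.2 == a) = (a == d.2 && b == d.1)
  have c1 : (d.1 == b) = (b == d.1) := by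
    by_cases h : d.1 = b
    · simp [h]
    · simp [h, Ne.symm h]
  have c2 : (d.2 == a) = (a == d.2) := by
    by_cases h : d.2 = a
    · simp [h]
    · simp [h, Ne.symm h]
  rw [Bool.and_comm, c1, c2]

-- no entry of L carries value rev ↔ A's scan finds nothing
lemma pv_nomatch (L : List (Int × (Int × Int))) (rev : Int × Int)
    (h : L.filter (fun p => p.2 == rev) = []) :
    List.findIdx? (fun r => r == rev) (L.map (·.2)) = none := by
  rw [List.findIdx?_eq_none_iff]
  intro r hr
  obtain ⟨p, hp, rfl⟩ := List.mem_map.mp hr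
  have := List.filter_eq_nil_iff.mp h p hp
  simpa using this

-- with unique indices, erasing the first VALUE-match (j, rev) of L by its
-- INDEX j is exactly A's erase-by-first-position, and the per-value index
-- lists change the way the midpoint's queues do
lemma pv_central (L : List (Int × (Int × Int))) (rev : Int × Int) (j : Int)
    (tl : List (Int × (Int × Int)))
    (hnd : (L.map (·.1)).Nodup)
    (hf : L.filter (fun p => p.2 == rev) = (j, rev) :: tl) :
    ∃ i, List.findIdx? (fun r => r == rev) (L.map (·.2)) = some i ∧
      (L.map (·.2)).eraseIdx i = (L.filter (fun p => !(p.1 == j))).map (·.2) ∧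
      (L.filter (fun p => !(p.1 == j))).filter (fun p => p.2 == rev) = tl ∧
      (∀ k, k ≠ rev →
        (L.filter (fun p => !(p.1 == j))).filter (fun p => p.2 == k)
          = L.filter (fun p => p.2 == k)) := by
  induction L generalizing tl with
  | nil => simp at hf
  | cons p L2 ih =>
    simp only [List.map_cons, List.nodup_cons] at hnd
    by_cases hp : p.2 = rev
    · have hcons : p :: L2.filter (fun q => q.2 == rev) = (j, rev) :: tl := by
        simpa [List.filter_cons, hp] using hf
      have hpj : p = (j, rev) := (List.cons.injEq _ _ _ _ ▸ hcons).1
      have htl : L2.filter (fun q => q.2 == rev) = tl := ((List.cons.injEq _ _ _ _).mp hcons).2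
      have hclean : L2.filter (fun q => !(q.1 == j)) = L2 := by
        apply List.filter_eq_self.mpr
        intro q hq
        have hq1 : q.1 ≠ j := by
          intro hqj
          apply hnd.1
          have hpj1 : p.1 = j := by rw [hpj]
          exact List.mem_map.mpr ⟨q, hq, by rw [hqj, hpj1]⟩
        simpa using hq1
      refine ⟨0, ?_, ?_, ?_, ?_⟩
      · simp [List.findIdx?_cons, hp]
      · simp [hpj, hclean]
      · simp [hpj, hclean, htl]
      · intro k hk
        have hpk : (rev == k) = false := by
          simp only [beq_eq_false_iff_ne, ne_eq]
          exact fun h => hk h.symm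
        simp [hpj, hclean, hpk]
    · have hf2 : L2.filter (fun q => q.2 == rev) = (j, rev) :: tl := by
        simpa [List.filter_cons, hp] using hf
      obtain ⟨i, h1, h2, h3, h4⟩ := ih tl hnd.2 hf2
      have hjmem : j ∈ L2.map (·.1) := by
        have : (j, rev) ∈ L2 := List.mem_of_mem_filter (hf2 ▸ List.mem_cons_self)
        exact List.mem_map_of_mem this
      have hpj : (p.1 == j) = false := by
        simp only [beq_eq_false_iff_ne, ne_eq]
        intro h; exact hnd.1 (h ▸ hjmem)
      refine ⟨i + 1, ?_, ?_, ?_, ?_⟩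
      · simp [List.findIdx?_cons, hp, h1]
      · simp [List.eraseIdx_cons_succ, hpj, h2]
      · simp [hpj, hp, h3]
      · intro k hk
        by_cases hpk : p.2 = k <;> simp [hpj, hpk, h4 k hk]

-- enumerate facts
lemma pv_enum_lb (ds : List (Int × Int)) (m : Int) (p : Int × (Int × Int))
    (hp : p ∈ PySem.List.enumerate ds m) : m ≤ p.1 := by
  have h1 : p.1 ∈ (PySem.List.enumerate ds m).map (·.1) := List.mem_map_of_mem hp
  rw [PySem.List.map_fst_enumerate] at h1
  exact (PySem.List.mem_pyRange_one.mp h1).1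

lemma pv_enum_nodup (ds : List (Int × Int)) (m : Int) :
    ((PySem.List.enumerate ds m).map (·.1)).Nodup := by
  rw [PySem.List.map_fst_enumerate]
  exact PySem.List.nodup_pyRange_one _ _

-- a sublist of a list with distinct indices is recovered by filtering on its indices
lemma pv_filter_sublist (T L : List (Int × (Int × Int))) (h : T.Sublist L)
    (hnd : (L.map (·.1)).Nodup) :
    L.filter (fun p => (T.map (·.1)).contains p.1) = T := by
  induction h with
  | slnil => rfl
  | cons b h ih =>
    rename_i l₁ l₂
    simp only [List.map_cons, List.nodup_cons] at hnd
    have hb : ((l₁.map (·.1)).contains b.1) = false := by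
      simp only [List.contains_eq_mem, decide_eq_false_iff_not]
      intro hmem
      exact hnd.1 (List.Sublist.subset (h.map (·.1)) hmem)
    simp only [List.filter_cons, hb, ih hnd.2, if_false, Bool.false_eq_true]
  | cons₂ a h ih =>
    rename_i l₁ l₂
    simp only [List.map_cons, List.nodup_cons] at hnd
    rw [List.filter_cons_of_pos (by simp)]
    congr 1
    rw [List.filter_congr (fun p hp => ?_), ih hnd.2]
    have : p.1 ≠ a.1 := fun he => hnd.1 (he ▸ List.mem_map_of_mem hp)
    simp [List.contains_eq_mem, this]

-- canonical-key facts
lemma pv_canon_cases (d : Int × Int) : pvCanon d = d ∨ pvCanon d = (d.2, d.1) := by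
  by_cases h : d.1 ≤ d.2 <;> simp [pvCanon, h]

lemma pv_canon_rev (d : Int × Int) : pvCanon (d.2, d.1) = pvCanon d := by
  rcases d with ⟨a, b⟩
  simp only [pvCanon]
  split_ifs with h1 h2 h2
  · have : a = b := le_antisymm h2 h1
    rw [this]
  · rfl
  · rfl
  · omega

lemma pv_canon_idem (d : Int × Int) : pvCanon (pvCanon d) = pvCanon d := by
  rcases d with ⟨a, b⟩
  by_cases h : a ≤ b
  · simp [pvCanon, h]
  · have hba : b ≤ a := by omega
    simp [pvCanon, h, hba]

lemma pv_canon_of_eq (v k : Int × Int) (hv : pvCanon v = k) : v = k ∨ v = (k.2, k.1) := by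
  rcases pv_canon_cases v with h | h
  · exact Or.inl (by rw [← hv, h])
  · right
    rw [← hv, h]

lemma pv_canon_pair (w d k : Int × Int) (hw : pvCanon w = k) (hd : pvCanon d = k)
    (hne : w ≠ d) : w = (d.2, d.1) := by
  rcases pv_canon_of_eq w k hw with h1 | h1 <;> rcases pv_canon_of_eq d k hd with h2 | h2
  · exact absurd (h1.trans h2.symm) hne
  · rw [h1, h2]
  · rw [h1, h2]
  · exact absurd (h1.trans h2.symm) hne

lemma pv_ne_of_canon_ne (v d k : Int × Int) (hv : pvCanon v = k) (hd : pvCanon d ≠ k) :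
    v ≠ d ∧ v ≠ (d.2, d.1) := by
  constructor
  · rintro rfl; exact hd hv
  · rintro rfl
    rw [pv_canon_rev] at hv
    exact hd hv

-- midpoint facts: the self-connect output is a sublist of the input,
-- every removed entry's value is the reverse of some input value
lemma pv_grun_S_sublist (L : List (Int × (Int × Int))) :
    ∀ (σ : PySem.Dict (Int × Int) (List Int)), (pvGrun L σ).2.2.Sublist L := by
  induction L with
  | nil => intro σ; simp [pvGrun]
  | cons nd L ih =>
    intro σ
    rcases hσ : σ.getD (nd.2.2, nd.2.1) [] with _ | ⟨j, rest⟩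
    · simp only [pvGrun, hσ]
      exact (ih _).cons nd
    · simp only [pvGrun, hσ]
      exact (ih _).cons₂ nd

lemma pv_grun_R_tag (L : List (Int × (Int × Int))) :
    ∀ (σ : PySem.Dict (Int × Int) (List Int)) (p : Int × (Int × Int)),
    p ∈ (pvGrun L σ).2.1 → ∃ e ∈ L, p.2 = (e.2.2, e.2.1) := by
  induction L with
  | nil => intro σ p hp; simp [pvGrun] at hp
  | cons nd L ih =>
    intro σ p hp
    rcases hσ : σ.getD (nd.2.2, nd.2.1) [] with _ | ⟨j, rest⟩
    · simp only [pvGrun, hσ] at hp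
      obtain ⟨e, he, h2⟩ := ih _ p hp
      exact ⟨e, List.mem_cons_of_mem _ he, h2⟩
    · simp only [pvGrun, hσ, List.mem_cons] at hp
      rcases hp with rfl | hp
      · exact ⟨nd, List.mem_cons_self, rfl⟩
      · obtain ⟨e, he, h2⟩ := ih _ p hp
        exact ⟨e, List.mem_cons_of_mem _ he, h2⟩

-- A = reconstruction from the midpoint: the loop invariant carried through both passes
lemma pv_loopA (ds : List (Int × Int)) :
    ∀ (n : Int) (σ : PySem.Dict (Int × Int) (List Int))
      (alive : List (Int × (Int × Int))) (sls : List (Int × Int)),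
    (alive.map (·.1)).Nodup →
    (∀ p ∈ alive, p.1 < n) →
    (∀ v, σ.getD v [] = (alive.filter (·.2 == v)).map (·.1)) →
    ds.foldl pvStepA (alive.map (·.2), sls)
      = (((alive ++ PySem.List.enumerate ds n).filter
            (fun p => !((pvGrun (PySem.List.enumerate ds n) σ).2.1.map (·.1)).contains p.1
                   && !((pvGrun (PySem.List.enumerate ds n) σ).2.2.map (·.1)).contains p.1)).map (·.2),
          sls ++ (pvGrun (PySem.List.enumerate ds n) σ).2.2.map (·.2)) := by
  induction ds with
  | nil =>
    intro n σ alive sls _ _ _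
    simp [PySem.List.enumerate_nil, pvGrun]
  | cons d ds ih =>
    intro n σ alive sls hnd hbound hq
    rw [PySem.List.enumerate_cons, List.foldl_cons]
    rcases hfil : alive.filter (·.2 == (d.2, d.1)) with _ | ⟨p0, tl⟩
    · -- no reversed match in the alive list: both sides append
      have hσrev : σ.getD (d.2, d.1) [] = [] := by rw [hq, hfil]; rfl
      have hgr : pvGrun ((n, d) :: PySem.List.enumerate ds (n + 1)) σ
          = pvGrun (PySem.List.enumerate ds (n + 1)) (σ.insert d (σ.getD d [] ++ [n])) := by
        simp only [pvGrun, hσrev]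
      have hA : pvStepA (alive.map (·.2), sls) d = ((alive ++ [(n, d)]).map (·.2), sls) := by
        unfold pvStepA
        rw [pv_pred_eq d, pv_nomatch _ _ hfil]
        split <;> simp
      rw [hA]
      have hnfresh : n ∉ alive.map (·.1) := by
        intro hmem
        obtain ⟨p, hp, hp1⟩ := List.mem_map.mp hmem
        exact absurd (hp1 ▸ hbound p hp) (lt_irrefl n)
      have hnd' : ((alive ++ [(n, d)]).map (·.1)).Nodup := by
        simp only [List.map_append, List.map_cons, List.map_nil]
        exact List.Nodup.append hnd (List.nodup_singleton n)
          (by intro a ha hb; simp only [List.mem_singleton] at hb; exact hnfresh (hb ▸ ha))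
      have hbound' : ∀ p ∈ alive ++ [(n, d)], p.1 < n + 1 := by
        intro p hp
        rcases List.mem_append.mp hp with h | h
        · exact lt_trans (hbound p h) (lt_add_one n)
        · simp only [List.mem_singleton] at h
          subst h
          exact lt_add_one n
      have hq' : ∀ v, (σ.insert d (σ.getD d [] ++ [n])).getD v []
          = ((alive ++ [(n, d)]).filter (·.2 == v)).map (·.1) := by
        intro v
        rw [PySem.Dict.getD_insert]
        by_cases hv : v = d
        · subst hv
          rw [if_pos rfl, hq, List.filter_append]
          simp
        · rw [if_neg hv, hq, List.filter_append]
          have hdv : (d == v) = false := by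
            simp only [beq_eq_false_iff_ne, ne_eq]
            exact fun h => hv h.symm
          simp [hdv]
      have := ih (n + 1) (σ.insert d (σ.getD d [] ++ [n])) (alive ++ [(n, d)]) sls hnd' hbound' hq'
      rw [this, hgr]
      simp [List.append_assoc]
    · -- first reversed match found: A erases it, the midpoint pops its queue
      have hp0 : p0 = (p0.1, (d.2, d.1)) := by
        have := List.mem_filter.mp (hfil ▸ List.mem_cons_self)
        have h2 : p0.2 = (d.2, d.1) := by simpa using this.2
        exact Prod.ext rfl h2
      have hp0mem : p0 ∈ alive := List.mem_of_mem_filter (hfil ▸ List.mem_cons_self)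
      have hjlt : p0.1 < n := hbound p0 hp0mem
      have hσrev : σ.getD (d.2, d.1) [] = p0.1 :: tl.map (·.1) := by
        rw [hq, hfil]
        simp
      have hfil' : alive.filter (fun p => p.2 == (d.2, d.1)) = (p0.1, (d.2, d.1)) :: tl := by
        rw [← hp0]; exact hfil
      obtain ⟨i, hfind, herase, hfil2, hfilother⟩ :=
        pv_central alive (d.2, d.1) p0.1 tl hnd hfil'
      have hne : alive ≠ [] := by
        intro h; rw [h] at hfil; simp at hfil
      have hA : pvStepA (alive.map (·.2), sls) d
          = ((alive.filter (fun p => !(p.1 == p0.1))).map (·.2), sls ++ [d]) := by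
        unfold pvStepA
        rw [pv_pred_eq d, hfind, ← herase]
        simp [hne]
      rw [hA]
      have hgr : pvGrun ((n, d) :: PySem.List.enumerate ds (n + 1)) σ
          = ((pvGrun (PySem.List.enumerate ds (n + 1)) (σ.insert (d.2, d.1) (tl.map (·.1)))).1,
             (p0.1, (d.2, d.1)) :: (pvGrun (PySem.List.enumerate ds (n + 1)) (σ.insert (d.2, d.1) (tl.map (·.1)))).2.1,
             (n, d) :: (pvGrun (PySem.List.enumerate ds (n + 1)) (σ.insert (d.2, d.1) (tl.map (·.1)))).2.2) := by
        simp only [pvGrun, hσrev]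
      have hnd'' : ((alive.filter (fun p => !(p.1 == p0.1))).map (·.1)).Nodup :=
        hnd.sublist (List.Sublist.map _ List.filter_sublist)
      have hbound'' : ∀ p ∈ alive.filter (fun p => !(p.1 == p0.1)), p.1 < n + 1 := by
        intro p hp
        exact lt_trans (hbound p (List.mem_of_mem_filter hp)) (lt_add_one n)
      have hq'' : ∀ v, (σ.insert (d.2, d.1) (tl.map (·.1))).getD v []
          = ((alive.filter (fun p => !(p.1 == p0.1))).filter (·.2 == v)).map (·.1) := by
        intro v
        rw [PySem.Dict.getD_insert]
        by_cases hv : v = (d.2, d.1)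
        · subst hv
          rw [if_pos rfl, hfil2]
        · rw [if_neg hv, hfilother v hv, hq]
      have hIH := ih (n + 1) (σ.insert (d.2, d.1) (tl.map (·.1)))
        (alive.filter (fun p => !(p.1 == p0.1))) (sls ++ [d]) hnd'' hbound'' hq''
      rw [hIH, hgr]
      refine Prod.ext ?_ ?_
      · -- survivors: commute the filters
        simp only [List.map_cons, List.filter_append]
        have hstep : ∀ (R S : List Int),
            List.filter (fun p => !((p0.1 :: R).contains p.1) && !((n :: S).contains p.1))
                ((n, d) :: PySem.List.enumerate ds (n + 1))
            = List.filter (fun p => !(R.contains p.1) && !(S.contains p.1))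
                (PySem.List.enumerate ds (n + 1)) := by
          intro R S
          rw [List.filter_cons_of_neg (by simp)]
          refine List.filter_congr ?_
          intro p hp
          have h1 : n + 1 ≤ p.1 := pv_enum_lb ds (n + 1) p hp
          have hpn : p.1 ≠ n := by omega
          have hpj : p.1 ≠ p0.1 := by omega
          simp [hpn, hpj]
        have halive : ∀ (R S : List Int),
            List.filter (fun p => !((p0.1 :: R).contains p.1) && !((n :: S).contains p.1)) alive
            = List.filter (fun p => !(R.contains p.1) && !(S.contains p.1))
                (alive.filter (fun p => !(p.1 == p0.1))) := by
          intro R S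
          rw [List.filter_filter]
          refine List.filter_congr ?_
          intro p hp
          have h1 : p.1 < n := hbound p hp
          have hpn : p.1 ≠ n := by omega
          simp only [beq_eq_decide]
          simp [hpn]
          ac_rfl
        simp only [hstep, halive]
      · simp


-- alignment of one bucket's queue with the midpoint's per-orientation queues
def pvAlign (k : Int × Int) (σ : PySem.Dict (Int × Int) (List Int))
    (q : List Int) (h : Int) (orient : Option (Int × Int)) : Prop :=
  0 ≤ h ∧ h ≤ (q.length : Int) ∧
  (h < (q.length : Int) → ∃ v, orient = some v ∧ pvCanon v = k) ∧
  (∀ v, pvCanon v = k → σ.getD v [] = if orient == some v then q.drop h.toNat else [])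

-- projection: B's matcher on one bucket collects exactly the midpoint's
-- removals/self-connects whose value belongs to that bucket
lemma pv_proj (k : Int × Int) (_hk : pvCanon k = k) :
    ∀ (L : List (Int × (Int × Int))) (σ : PySem.Dict (Int × Int) (List Int))
      (q : List Int) (h : Int) (orient : Option (Int × Int)) (rm sf : PySem.Set Int),
    pvAlign k σ q h orient →
    (∀ j : Int,
        j ∈ ((L.filter (fun nd => pvCanon nd.2 == k)).foldl pvMatchStep (q, h, orient, rm, sf)).2.2.2.1
          ↔ j ∈ rm ∨ ∃ p ∈ (pvGrun L σ).2.1, p.1 = j ∧ pvCanon p.2 = k) ∧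
    (∀ j : Int,
        j ∈ ((L.filter (fun nd => pvCanon nd.2 == k)).foldl pvMatchStep (q, h, orient, rm, sf)).2.2.2.2
          ↔ j ∈ sf ∨ ∃ p ∈ (pvGrun L σ).2.2, p.1 = j ∧ pvCanon p.2 = k) := by
  intro L
  induction L with
  | nil =>
    intro σ q h orient rm sf _
    simp [pvGrun]
  | cons nd L ih =>
    intro σ q h orient rm sf halign
    obtain ⟨h0, h1, h2, h3⟩ := halign
    have hrevc : pvCanon (nd.2.2, nd.2.1) = pvCanon nd.2 := pv_canon_rev nd.2
    by_cases hcd : pvCanon nd.2 = k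
    · -- the element belongs to this bucket
      rw [List.filter_cons_of_pos (by simp [hcd]), List.foldl_cons]
      have hrev : pvCanon (nd.2.2, nd.2.1) = k := hrevc.trans hcd
      by_cases hcond : h < (q.length : Int) ∧ (orient == some (nd.2.2, nd.2.1)) = true
      · -- pop branch on both sides
        have horient : orient = some (nd.2.2, nd.2.1) := eq_of_beq hcond.2
        have hlt : h.toNat < q.length := by omega
        have hdrop : q.drop h.toNat = q[h.toNat] :: q.drop (h.toNat + 1) :=
          List.drop_eq_getElem_cons hlt
        have hσrev : σ.getD (nd.2.2, nd.2.1) [] = q[h.toNat] :: q.drop (h.toNat + 1) := by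
          rw [h3 _ hrev, if_pos (by rw [horient]; simp)]
          exact hdrop
        have hstep : pvMatchStep (q, h, orient, rm, sf) nd
            = (q, h + 1, orient, PySem.Set.add rm q[h.toNat], PySem.Set.add sf nd.1) := by
          simp only [pvMatchStep]
          rw [if_pos hcond]
          have : PySem.List.pyGet? q h = some q[h.toNat] :=
            PySem.List.pyGet?_eq_some_getElem (xs := q) (i := h) h0 (by omega)
          rw [this]
          rfl
        have hgr : pvGrun (nd :: L) σ
            = ((pvGrun L (σ.insert (nd.2.2, nd.2.1) (q.drop (h.toNat + 1)))).1,
               (q[h.toNat], (nd.2.2, nd.2.1)) :: (pvGrun L (σ.insert (nd.2.2, nd.2.1) (q.drop (h.toNat + 1)))).2.1,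
               nd :: (pvGrun L (σ.insert (nd.2.2, nd.2.1) (q.drop (h.toNat + 1)))).2.2) := by
          simp only [pvGrun, hσrev]
        have halign' : pvAlign k (σ.insert (nd.2.2, nd.2.1) (q.drop (h.toNat + 1))) q (h + 1) orient := by
          refine ⟨by omega, by omega, fun _ => ⟨(nd.2.2, nd.2.1), horient, hrev⟩, ?_⟩
          intro v hv
          rw [PySem.Dict.getD_insert]
          by_cases hveq : v = (nd.2.2, nd.2.1)
          · subst hveq
            rw [if_pos rfl, if_pos (by rw [horient]; simp)]
            congr 1
            omega
          · rw [if_neg hveq, h3 v hv]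
            have hb : (orient == some v) = false := by
              rw [horient]
              simp only [beq_eq_false_iff_ne, ne_eq]
              intro hx
              exact hveq (Option.some.inj hx).symm
            rw [hb]
            simp
        obtain ⟨ihR, ihS⟩ := ih (σ.insert (nd.2.2, nd.2.1) (q.drop (h.toNat + 1))) q (h + 1) orient
          (PySem.Set.add rm q[h.toNat]) (PySem.Set.add sf nd.1) halign'
        rw [hstep]
        constructor
        · intro j
          rw [ihR j, hgr]
          simp only [PySem.Set.mem_add, List.mem_cons]
          constructor
          · rintro ((hj | rfl) | ⟨p, hp, rfl, hc⟩)
            · exact Or.inl hj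
            · exact Or.inr ⟨(q[h.toNat], (nd.2.2, nd.2.1)), Or.inl rfl, rfl, hrev⟩
            · exact Or.inr ⟨p, Or.inr hp, rfl, hc⟩
          · rintro (hj | ⟨p, hp | hp, rfl, hc⟩)
            · exact Or.inl (Or.inl hj)
            · rw [hp]
              exact Or.inl (Or.inr rfl)
            · exact Or.inr ⟨p, hp, rfl, hc⟩
        · intro j
          rw [ihS j, hgr]
          simp only [PySem.Set.mem_add, List.mem_cons]
          constructor
          · rintro ((hj | rfl) | ⟨p, hp, rfl, hc⟩)
            · exact Or.inl hj
            · exact Or.inr ⟨nd, Or.inl rfl, rfl, hcd⟩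
            · exact Or.inr ⟨p, Or.inr hp, rfl, hc⟩
          · rintro (hj | ⟨p, hp | hp, rfl, hc⟩)
            · exact Or.inl (Or.inl hj)
            · rw [hp]
              exact Or.inl (Or.inr rfl)
            · exact Or.inr ⟨p, hp, rfl, hc⟩
      · -- push branch on both sides
        have hσrev : σ.getD (nd.2.2, nd.2.1) [] = [] := by
          rw [h3 _ hrev]
          rcases hb : (orient == some (nd.2.2, nd.2.1)) with _ | _
          · simp
          · have hh : ¬ h < (q.length : Int) := fun hx => hcond ⟨hx, hb⟩
            have : q.length ≤ h.toNat := by omega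
            simp [List.drop_eq_nil_of_le this]
        have hstep : pvMatchStep (q, h, orient, rm, sf) nd
            = (q ++ [nd.1], h, (if h == (q.length : Int) then some nd.2 else orient), rm, sf) := by
          simp only [pvMatchStep]
          rw [if_neg hcond]
        have hgr : pvGrun (nd :: L) σ
            = pvGrun L (σ.insert nd.2 (σ.getD nd.2 [] ++ [nd.1])) := by
          simp only [pvGrun, hσrev]
        have horient' : ∀ w, h < (q.length : Int) → orient = some w → pvCanon w = k → w = nd.2 := by
          intro w hhq how hcw
          by_contra hne
          have hwrev : w = (nd.2.2, nd.2.1) := pv_canon_pair w nd.2 k hcw hcd hne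
          exact hcond ⟨hhq, by rw [how, hwrev]; simp⟩
        have halign' : pvAlign k (σ.insert nd.2 (σ.getD nd.2 [] ++ [nd.1])) (q ++ [nd.1]) h
            (if h == (q.length : Int) then some nd.2 else orient) := by
          refine ⟨h0, by simp; omega, ?_, ?_⟩
          · intro _
            rcases hh : (h == (q.length : Int)) with _ | _
            · have hhlt : h < (q.length : Int) := by
                have := beq_eq_false_iff_ne.mp hh
                omega
              obtain ⟨v, hv1, hv2⟩ := h2 hhlt
              exact ⟨v, by simp [hv1], hv2⟩
            · exact ⟨nd.2, by simp, hcd⟩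
          · intro v hv
            rw [PySem.Dict.getD_insert]
            by_cases hveq : v = nd.2
            · rw [if_pos hveq]
              rcases hh : (h == (q.length : Int)) with _ | _
              · -- queue still live: its orientation must be nd.2 itself
                have hhlt : h < (q.length : Int) := by
                  have := beq_eq_false_iff_ne.mp hh
                  omega
                obtain ⟨w, hw1, hw2⟩ := h2 hhlt
                have hwv : w = nd.2 := horient' w hhlt hw1 hw2
                rw [h3 nd.2 hcd, hw1, hwv, hveq]
                simp only [Bool.false_eq_true, if_false, beq_self_eq_true, if_true]
                rw [List.drop_append_of_le_length (by omega)]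
              · -- fresh queue: it restarts with this single index
                have hheq : h = (q.length : Int) := by
                  have := eq_of_beq hh
                  omega
                have hdq : q.drop h.toNat = [] := List.drop_eq_nil_of_le (by omega)
                rw [h3 nd.2 hcd, hdq, hveq]
                simp only [if_true, beq_self_eq_true, ite_self]
                rw [List.drop_append_of_le_length (by omega), hdq]
            · rw [if_neg hveq, h3 v hv]
              rcases hh : (h == (q.length : Int)) with _ | _
              · have hhlt : h < (q.length : Int) := by
                  have := beq_eq_false_iff_ne.mp hh
                  omega
                simp only [Bool.false_eq_true, if_false]
                rcases orient with _ | w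
                · simp
                · obtain ⟨w', hw1', hw2'⟩ := h2 hhlt
                  have hww : w = w' := Option.some.inj hw1'
                  have hwnd : w = nd.2 := horient' w hhlt rfl (hww ▸ hw2')
                  have hb : (some w == some v) = false := by
                    simp only [beq_eq_false_iff_ne, ne_eq]
                    intro hx
                    exact hveq ((Option.some.inj hx) ▸ hwnd)
                  rw [hb]
                  simp
              · -- queue exhausted: both sides are empty
                have hheq : h = (q.length : Int) := by
                  have := eq_of_beq hh
                  omega
                have hdq : q.drop h.toNat = [] := List.drop_eq_nil_of_le (by omega)
                have hb2 : (some nd.2 == some v) = false := by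
                  simp only [beq_eq_false_iff_ne, ne_eq]
                  intro hx
                  exact hveq (Option.some.inj hx).symm
                rw [hdq]
                simp [hb2]
        obtain ⟨ihR, ihS⟩ := ih (σ.insert nd.2 (σ.getD nd.2 [] ++ [nd.1])) (q ++ [nd.1]) h
          (if h == (q.length : Int) then some nd.2 else orient) rm sf halign'
        rw [hstep, hgr]
        exact ⟨ihR, ihS⟩
    · -- the element belongs to another bucket: its step is invisible here
      rw [List.filter_cons_of_neg (by simp [hcd])]
      have hrevne : pvCanon (nd.2.2, nd.2.1) ≠ k := by rw [hrevc]; exact hcd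
      rcases hσ : σ.getD (nd.2.2, nd.2.1) [] with _ | ⟨j0, rest⟩
      · have hgr : pvGrun (nd :: L) σ
            = pvGrun L (σ.insert nd.2 (σ.getD nd.2 [] ++ [nd.1])) := by
          simp only [pvGrun, hσ]
        have halign' : pvAlign k (σ.insert nd.2 (σ.getD nd.2 [] ++ [nd.1])) q h orient := by
          refine ⟨h0, h1, h2, ?_⟩
          intro v hv
          rw [PySem.Dict.getD_insert, if_neg (pv_ne_of_canon_ne v nd.2 k hv hcd).1, h3 v hv]
        rw [hgr]
        exact ih _ q h orient rm sf halign'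
      · have hgr : pvGrun (nd :: L) σ
            = ((pvGrun L (σ.insert (nd.2.2, nd.2.1) rest)).1,
               (j0, (nd.2.2, nd.2.1)) :: (pvGrun L (σ.insert (nd.2.2, nd.2.1) rest)).2.1,
               nd :: (pvGrun L (σ.insert (nd.2.2, nd.2.1) rest)).2.2) := by
          simp only [pvGrun, hσ]
        have halign' : pvAlign k (σ.insert (nd.2.2, nd.2.1) rest) q h orient := by
          refine ⟨h0, h1, h2, ?_⟩
          intro v hv
          rw [PySem.Dict.getD_insert, if_neg (pv_ne_of_canon_ne v nd.2 k hv hcd).2, h3 v hv]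
        obtain ⟨ihR, ihS⟩ := ih (σ.insert (nd.2.2, nd.2.1) rest) q h orient rm sf halign'
        rw [hgr]
        constructor
        · intro j
          rw [ihR j]
          simp only [List.mem_cons]
          constructor
          · rintro (hj | ⟨p, hp, rfl, hc⟩)
            · exact Or.inl hj
            · exact Or.inr ⟨p, Or.inr hp, rfl, hc⟩
          · rintro (hj | ⟨p, hp | hp, rfl, hc⟩)
            · exact Or.inl hj
            · exact absurd (by rw [hp] at hc; exact hc) hrevne
            · exact Or.inr ⟨p, hp, rfl, hc⟩
        · intro j
          rw [ihS j]
          simp only [List.mem_cons]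
          constructor
          · rintro (hj | ⟨p, hp, rfl, hc⟩)
            · exact Or.inl hj
            · exact Or.inr ⟨p, Or.inr hp, rfl, hc⟩
          · rintro (hj | ⟨p, hp | hp, rfl, hc⟩)
            · exact Or.inl hj
            · exact absurd (by rw [hp] at hc; exact hc) hcd
            · exact Or.inr ⟨p, hp, rfl, hc⟩

-- stage-2 fold over the buckets, membership-wise
lemma pv_stage2 (E : List (Int × (Int × Int))) :
    ∀ (ks : List (Int × Int)) (rm sf : PySem.Set Int),
    (∀ k ∈ ks, pvCanon k = k) →
    (∀ j : Int,
        j ∈ (ks.foldl (fun acc k =>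
              (((E.filter (fun nd => pvCanon nd.2 == k)).foldl pvMatchStep ([], 0, none, acc.1, acc.2)).2.2.2.1,
               ((E.filter (fun nd => pvCanon nd.2 == k)).foldl pvMatchStep ([], 0, none, acc.1, acc.2)).2.2.2.2))
            (rm, sf)).1
          ↔ j ∈ rm ∨ ∃ k ∈ ks, ∃ p ∈ (pvGrun E PySem.Dict.empty).2.1, p.1 = j ∧ pvCanon p.2 = k) ∧
    (∀ j : Int,
        j ∈ (ks.foldl (fun acc k =>
              (((E.filter (fun nd => pvCanon nd.2 == k)).foldl pvMatchStep ([], 0, none, acc.1, acc.2)).2.2.2.1,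
               ((E.filter (fun nd => pvCanon nd.2 == k)).foldl pvMatchStep ([], 0, none, acc.1, acc.2)).2.2.2.2))
            (rm, sf)).2
          ↔ j ∈ sf ∨ ∃ k ∈ ks, ∃ p ∈ (pvGrun E PySem.Dict.empty).2.2, p.1 = j ∧ pvCanon p.2 = k) := by
  intro ks
  induction ks with
  | nil =>
    intro rm sf _
    simp
  | cons k0 ks ih =>
    intro rm sf hcanon
    have halign0 : pvAlign k0 PySem.Dict.empty [] 0 none := by
      refine ⟨le_refl 0, by simp, by intro hx; exact absurd hx (by norm_num), ?_⟩
      intro v _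
      simp [PySem.Dict.getD_empty]
    obtain ⟨pR, pS⟩ := pv_proj k0 (hcanon k0 List.mem_cons_self) E PySem.Dict.empty
      [] 0 none rm sf halign0
    obtain ⟨iR, iS⟩ := ih
      ((E.filter (fun nd => pvCanon nd.2 == k0)).foldl pvMatchStep ([], 0, none, rm, sf)).2.2.2.1
      ((E.filter (fun nd => pvCanon nd.2 == k0)).foldl pvMatchStep ([], 0, none, rm, sf)).2.2.2.2
      (fun k hk => hcanon k (List.mem_cons_of_mem _ hk))
    rw [List.foldl_cons]
    constructor
    · intro j
      rw [iR j, pR j]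
      simp only [List.exists_mem_cons_iff]
      rw [or_assoc]
    · intro j
      rw [iS j, pS j]
      simp only [List.exists_mem_cons_iff]
      rw [or_assoc]

-- B's status sets are membership-equal to the midpoint's removal/self index lists
lemma pv_status_mem (data : List (Int × Int)) :
    (∀ j : Int, j ∈ (pvStatus data).1
        ↔ j ∈ ((pvGrun (PySem.List.enumerate data 0) PySem.Dict.empty).2.1.map (·.1))) ∧
    (∀ j : Int, j ∈ (pvStatus data).2
        ↔ j ∈ ((pvGrun (PySem.List.enumerate data 0) PySem.Dict.empty).2.2.map (·.1))) := by
  have hfold : pvGroups data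
      = ((PySem.List.enumerate data 0).map (fun nd => (pvCanon nd.2, nd))).foldl
          (fun g p => g.modify p.1 [] (· ++ [p.2])) PySem.Dict.empty := by
    rw [List.foldl_map]
    rfl
  have hgetD : ∀ k, (pvGroups data).getD k []
      = (PySem.List.enumerate data 0).filter (fun nd => pvCanon nd.2 == k) := by
    intro k
    rw [hfold, PySem.Dict.getD_foldl_modify_append, PySem.Dict.getD_empty, List.nil_append,
      List.filter_map, List.map_map]
    simp [Function.comp_def]
  have hnodup : (pvGroups data).keys.Nodup := by
    rw [hfold]
    exact PySem.Dict.nodup_keys_foldl_modify_key _ _ _ _ _ PySem.Dict.nodup_keys_empty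
  have hkeys : (pvGroups data).keys
      = PySem.Set.ofList ((PySem.List.enumerate data 0).map (fun nd => pvCanon nd.2)) := by
    rw [hfold, PySem.Dict.keys_foldl_modify_key]
    rw [PySem.Dict.keys_empty, PySem.Set.update_nil_left, List.map_map]
    rfl
  have hkmem : ∀ k ∈ (pvGroups data).keys, pvCanon k = k := by
    intro k hk
    rw [hkeys, PySem.Set.mem_ofList] at hk
    obtain ⟨nd, _, rfl⟩ := List.mem_map.mp hk
    exact pv_canon_idem nd.2
  have hvalues : (pvGroups data).values
      = (pvGroups data).keys.map (fun k => (pvGroups data).getD k []) :=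
    PySem.Dict.values_eq_map_keys _ hnodup []
  have hstat : pvStatus data
      = (pvGroups data).keys.foldl (fun acc k =>
          ((((PySem.List.enumerate data 0).filter (fun nd => pvCanon nd.2 == k)).foldl
              pvMatchStep ([], 0, none, acc.1, acc.2)).2.2.2.1,
           (((PySem.List.enumerate data 0).filter (fun nd => pvCanon nd.2 == k)).foldl
              pvMatchStep ([], 0, none, acc.1, acc.2)).2.2.2.2))
        (PySem.Set.empty, PySem.Set.empty) := by
    rw [pvStatus, hvalues, List.foldl_map]
    simp only [hgetD]
  obtain ⟨sR, sS⟩ := pv_stage2 (PySem.List.enumerate data 0) (pvGroups data).keys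
    PySem.Set.empty PySem.Set.empty hkmem
  have hcoverR : ∀ p ∈ (pvGrun (PySem.List.enumerate data 0) PySem.Dict.empty).2.1,
      pvCanon p.2 ∈ (pvGroups data).keys := by
    intro p hp
    obtain ⟨e, he, hpe⟩ := pv_grun_R_tag (PySem.List.enumerate data 0) PySem.Dict.empty p hp
    rw [hkeys, PySem.Set.mem_ofList, hpe, pv_canon_rev]
    exact List.mem_map_of_mem he
  have hcoverS : ∀ p ∈ (pvGrun (PySem.List.enumerate data 0) PySem.Dict.empty).2.2,
      pvCanon p.2 ∈ (pvGroups data).keys := by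
    intro p hp
    have := (pv_grun_S_sublist (PySem.List.enumerate data 0) PySem.Dict.empty).subset hp
    rw [hkeys, PySem.Set.mem_ofList]
    exact List.mem_map_of_mem this
  constructor
  · intro j
    rw [hstat, sR j]
    simp only [PySem.Set.empty]
    constructor
    · rintro (hj | ⟨k, _, p, hp, rfl, _⟩)
      · simp at hj
      · exact List.mem_map_of_mem hp
    · intro hj
      obtain ⟨p, hp, rfl⟩ := List.mem_map.mp hj
      exact Or.inr ⟨pvCanon p.2, hcoverR p hp, p, hp, rfl, rfl⟩
  · intro j
    rw [hstat, sS j]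
    simp only [PySem.Set.empty]
    constructor
    · rintro (hj | ⟨k, _, p, hp, rfl, _⟩)
      · simp at hj
      · exact List.mem_map_of_mem hp
    · intro hj
      obtain ⟨p, hp, rfl⟩ := List.mem_map.mp hj
      exact Or.inr ⟨pvCanon p.2, hcoverS p hp, p, hp, rfl, rfl⟩

-- stage 3 is the two filters
lemma pv_stage3 (f g : Int → Bool) :
    ∀ (L : List (Int × (Int × Int))) (acc : (List (Int × Int)) × (List (Int × Int))),
    L.foldl (fun out nd =>
        if f nd.1 then (out.1, out.2 ++ [nd.2])
        else if g nd.1 then out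
        else (out.1 ++ [nd.2], out.2)) acc
      = (acc.1 ++ (L.filter (fun nd => !f nd.1 && !g nd.1)).map (·.2),
         acc.2 ++ (L.filter (fun nd => f nd.1)).map (·.2)) := by
  intro L
  induction L with
  | nil => intro acc; simp
  | cons nd L ih =>
    intro acc
    rcases hf : f nd.1
    · rcases hg : g nd.1 <;> simp [List.foldl_cons, hf, hg, ih]
    · simp [List.foldl_cons, hf, ih]


-- ===== VERDICT (by name: the statement is the Claim_ definition above) =====
theorem removeSelfConnect_spec : Claim_equal_removeSelfConnect := by
  intro data _
  unfold Spec_removeSelfConnect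
  obtain ⟨hR, hS⟩ := pv_status_mem data
  have hA := pv_loopA data 0 PySem.Dict.empty [] []
    (by simp) (by simp) (fun v => by simp [PySem.Dict.getD_empty])
  simp only [List.map_nil, List.nil_append] at hA
  have hb1 : ∀ x : Int, PySem.Set.contains (pvStatus data).1 x
      = ((pvGrun (PySem.List.enumerate data 0) PySem.Dict.empty).2.1.map (·.1)).contains x := by
    intro x
    rw [PySem.Set.contains_eq_listContains]
    simp only [List.contains_eq_mem]
    exact decide_eq_decide.mpr (hR x)
  have hb2 : ∀ x : Int, PySem.Set.contains (pvStatus data).2 x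
      = ((pvGrun (PySem.List.enumerate data 0) PySem.Dict.empty).2.2.map (·.1)).contains x := by
    intro x
    rw [PySem.Set.contains_eq_listContains]
    simp only [List.contains_eq_mem]
    exact decide_eq_decide.mpr (hS x)
  show removeSelfConnect data = removeSelfConnect_alt data
  unfold removeSelfConnect
  simp only [removeSelfConnect_alt]
  rw [pv_stage3, hA]
  refine Prod.ext ?_ ?_
  · simp only [List.nil_append]
    congr 1
    refine List.filter_congr ?_
    intro nd _
    rw [hb1, hb2, Bool.and_comm]
  · simp only [List.nil_append]
    have hfe : (PySem.List.enumerate data 0).filter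
        (fun nd => PySem.Set.contains (pvStatus data).2 nd.1)
        = (pvGrun (PySem.List.enumerate data 0) PySem.Dict.empty).2.2 := by
      rw [List.filter_congr (fun nd _ => hb2 nd.1)]
      exact pv_filter_sublist _ _ (pv_grun_S_sublist _ _) (pv_enum_nodup data 0)
    rw [hfe]
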